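-- pv_equiv track=rewrite | github.com/pankajrajdeo/BOND | Miscellaneous/CellxGene_Benchmark/04_llm_column_mapping.py | heuristic_candidates
-- ===== SOURCE A (Python) =====
-- from typing import Optional, List, Dict
--
-- CANDIDATE_LIMIT = 3
--
-- AUTHOR_PATTERNS = {
--     "assay": ["assay", "technology"],
--     "cell_type": ["cell_type", "annotation"],
--     "development_stage": ["stage", "age", "development"],
--     "disease": ["disease", "condition", "phenotype"],
--     "self_reported_ethnicity": ["ethnicity", "ancestry"],
--     "sex": ["sex", "gender"],
--     "tissue": ["tissue", "organ", "site"],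
-- }
--
-- ONTO_PATTERNS = {
--     "assay": ["assay_ontology", "_ontology_term_id"],
--     "cell_type": ["cell_type_ontology", "_ontology_term_id"],
--     "development_stage": ["development_stage_ontology", "_ontology_term_id"],
--     "disease": ["disease_ontology", "_ontology_term_id"],
--     "self_reported_ethnicity": ["ethnicity_ontology", "_ontology_term_id"],
--     "sex": ["sex_ontology", "_ontology_term_id"],
--     "tissue": ["tissue_ontology", "_ontology_term_id"],
-- }
--
-- def _contains_any(name: str, needles: List[str]) -> bool:
--     nm = name.lower()
--     return any(k in nm for k in needles)
--
-- def heuristic_candidates(headers: List[str]) -> Dict: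
--     out = {}
--     for key in AUTHOR_PATTERNS:
--         authors = [h for h in headers if _contains_any(h, AUTHOR_PATTERNS[key])]
--         onts = [h for h in headers if _contains_any(h, ONTO_PATTERNS[key])]
--         out[key] = {"likely_author": authors[:CANDIDATE_LIMIT],
--                     "likely_ontology": onts[:CANDIDATE_LIMIT]}
--     return out
-- ===== SOURCE B (Python) =====
-- from typing import List, Dict
--
-- CANDIDATE_LIMIT = 3
--
-- AUTHOR_PATTERNS = {
--     "assay": ["assay", "technology"],
--     "cell_type": ["cell_type", "annotation"],
--     "development_stage": ["stage", "age", "development"],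
--     "disease": ["disease", "condition", "phenotype"],
--     "self_reported_ethnicity": ["ethnicity", "ancestry"],
--     "sex": ["sex", "gender"],
--     "tissue": ["tissue", "organ", "site"],
-- }
--
-- ONTO_PATTERNS = {
--     "assay": ["assay_ontology", "_ontology_term_id"],
--     "cell_type": ["cell_type_ontology", "_ontology_term_id"],
--     "development_stage": ["development_stage_ontology", "_ontology_term_id"],
--     "disease": ["disease_ontology", "_ontology_term_id"],
--     "self_reported_ethnicity": ["ethnicity_ontology", "_ontology_term_id"],
--     "sex": ["sex_ontology", "_ontology_term_id"],
--     "tissue": ["tissue_ontology", "_ontology_term_id"],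
-- }
--
-- def heuristic_candidates(headers: List[str]) -> Dict:
--     # header-major pass: one lowercase per header, buckets capped as they fill
--     out = {key: {"likely_author": [], "likely_ontology": []} for key in AUTHOR_PATTERNS}
--     for h in headers:
--         nm = h.lower()
--         for key, d in out.items():
--             la = d["likely_author"]
--             if len(la) < CANDIDATE_LIMIT and any(p in nm for p in AUTHOR_PATTERNS[key]):
--                 la.append(h)
--             lo = d["likely_ontology"]
--             if len(lo) < CANDIDATE_LIMIT and any(p in nm for p in ONTO_PATTERNS[key]):
--                 lo.append(h)
--     return out
-- ===== Notes on version B (the rewrite author's own statement) =====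
-- stated objective: alternative
-- what changed: Inverted key-outer/header-inner nesting into a single header-major pass that lowercases each header once and appends into pre-initialised capped buckets, instead of building each key's two filtered lists with a fresh lowercase per membership test and slicing to 3 afterwards.
import Mathlib
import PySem

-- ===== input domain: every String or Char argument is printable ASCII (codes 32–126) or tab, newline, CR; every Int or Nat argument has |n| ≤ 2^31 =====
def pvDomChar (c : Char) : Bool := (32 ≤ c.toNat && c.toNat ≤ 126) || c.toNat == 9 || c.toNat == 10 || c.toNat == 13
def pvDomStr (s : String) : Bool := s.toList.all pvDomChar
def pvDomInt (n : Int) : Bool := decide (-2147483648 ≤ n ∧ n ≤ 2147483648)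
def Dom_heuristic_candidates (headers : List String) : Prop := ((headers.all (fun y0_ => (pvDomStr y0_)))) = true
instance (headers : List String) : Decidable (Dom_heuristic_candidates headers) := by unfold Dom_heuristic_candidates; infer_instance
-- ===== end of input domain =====

-- B inverts A's key-outer/header-inner nesting into one header-major pass with
-- pre-initialised capped buckets and a single lowercase per header (alternative decomposition).

-- ===== PORT A =====
-- module-level pattern dicts, shared verbatim by both Pythons
def pvAuthorPatterns : PySem.Dict String (List String) := PySem.Dict.ofList
  [("assay", ["assay", "technology"]),
   ("cell_type", ["cell_type", "annotation"]),
   ("development_stage", ["stage", "age", "development"]),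
   ("disease", ["disease", "condition", "phenotype"]),
   ("self_reported_ethnicity", ["ethnicity", "ancestry"]),
   ("sex", ["sex", "gender"]),
   ("tissue", ["tissue", "organ", "site"])]

def pvOntoPatterns : PySem.Dict String (List String) := PySem.Dict.ofList
  [("assay", ["assay_ontology", "_ontology_term_id"]),
   ("cell_type", ["cell_type_ontology", "_ontology_term_id"]),
   ("development_stage", ["development_stage_ontology", "_ontology_term_id"]),
   ("disease", ["disease_ontology", "_ontology_term_id"]),
   ("self_reported_ethnicity", ["ethnicity_ontology", "_ontology_term_id"]),
   ("sex", ["sex_ontology", "_ontology_term_id"]),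
   ("tissue", ["tissue_ontology", "_ontology_term_id"])]

-- _contains_any(name, needles)
def pvContainsAny (name : String) (needles : List String) : Bool :=
  let nm := PySem.Str.lower name
  needles.any (fun k => PySem.Str.isIn k nm)

def heuristic_candidates (headers : List String) : List (String × List (String × List String)) :=
  let out : PySem.Dict String (List (String × List String)) :=
    pvAuthorPatterns.keys.foldl (fun out key =>
      let authors := headers.filter (fun h => pvContainsAny h (pvAuthorPatterns.getD key []))
      let onts := headers.filter (fun h => pvContainsAny h (pvOntoPatterns.getD key []))
      out.insert key [("likely_author", PySem.List.slice authors none (some 3)),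
                      ("likely_ontology", PySem.List.slice onts none (some 3))])
      PySem.Dict.empty
  out.items

-- ===== PORT B =====
-- any(p in nm for p in needles), nm already lowered
def pvAnyIn (nm : String) (needles : List String) : Bool :=
  needles.any (fun p => PySem.Str.isIn p nm)

-- one state entry per key: (key, (likely_author, likely_ontology))
def pvUpdEntry (h nm : String) (e : String × List String × List String) :
    String × List String × List String :=
  let la := if e.2.1.length < 3 && pvAnyIn nm (pvAuthorPatterns.getD e.1 []) then e.2.1 ++ [h] else e.2.1
  let lo := if e.2.2.length < 3 && pvAnyIn nm (pvOntoPatterns.getD e.1 []) then e.2.2 ++ [h] else e.2.2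
  (e.1, la, lo)

def heuristic_candidates_alt (headers : List String) : List (String × List (String × List String)) :=
  let init := pvAuthorPatterns.keys.map (fun k => (k, ([] : List String), ([] : List String)))
  let final := headers.foldl (fun st h =>
      let nm := PySem.Str.lower h
      st.map (pvUpdEntry h nm)) init
  final.map (fun e => (e.1, [("likely_author", e.2.1), ("likely_ontology", e.2.2)]))

-- ===== PRECONDITION & SPEC =====
def Spec_heuristic_candidates (headers : List String) (out : List (String × List (String × List String))) : Prop := out = heuristic_candidates_alt headers
instance (headers : List String) (out : List (String × List (String × List String))) : Decidable (Spec_heuristic_candidates headers out) := by unfold Spec_heuristic_candidates; infer_instance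

-- ===== CLAIM (what is proved, stated in full; the proofs are below) =====
def Claim_equal_heuristic_candidates : Prop := ∀ (headers : List String), Dom_heuristic_candidates headers → Spec_heuristic_candidates headers (heuristic_candidates headers)

-- ===== LEMMAS AND PROOFS =====

-- a fold that maps every bucket independently = mapping each bucket's own fold
theorem pv_foldl_map_comm {α β : Type} (g : α → β → β) (hs : List α) (st : List β) :
    hs.foldl (fun s h => s.map (g h)) st = st.map (fun b => hs.foldl (fun b h => g h b) b) := by
  induction hs generalizing st with
  | nil => simp
  | cons h t ih =>
    simp only [List.foldl, ih, List.map_map]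
    rfl

-- the capped append-fold computes filter-then-take-3
theorem pv_bucket (hs : List String) (p : String → Bool) (acc : List String) :
    hs.foldl (fun acc h => if acc.length < 3 && p h then acc ++ [h] else acc) acc
      = acc ++ (hs.filter p).take (3 - acc.length) := by
  induction hs generalizing acc with
  | nil => simp
  | cons h t ih =>
    by_cases hp : p h = true
    · by_cases hl : acc.length < 3
      · simp only [List.foldl, hp, hl, List.filter_cons, if_pos, decide_true]
        rw [ih]
        have h3 : 3 - acc.length = (3 - (acc ++ [h]).length) + 1 := by
          simp; omega
        simp [h3, List.take_succ_cons]
      · simp only [List.foldl, hp, hl, List.filter_cons]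
        rw [ih]
        have h0 : 3 - acc.length = 0 := by omega
        simp [h0]
    · simp only [Bool.not_eq_true] at hp
      simp only [List.foldl, List.filter_cons, hp, Bool.and_false, Bool.false_eq_true, if_false]
      exact ih acc

theorem pv_bucket_nil (hs : List String) (p : String → Bool) :
    hs.foldl (fun acc h => if acc.length < 3 && p h then acc ++ [h] else acc) []
      = PySem.List.slice (hs.filter p) none (some 3) := by
  rw [pv_bucket, PySem.List.slice_to _ (by norm_num)]
  simp

-- the per-entry update fold splits into the key and two independent bucket folds
theorem pv_entry_fold (hs : List String) (k : String) (la lo : List String) :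
    hs.foldl (fun e h => pvUpdEntry h (PySem.Str.lower h) e) (k, la, lo)
      = (k,
         hs.foldl (fun acc h => if acc.length < 3 && pvContainsAny h (pvAuthorPatterns.getD k []) then acc ++ [h] else acc) la,
         hs.foldl (fun acc h => if acc.length < 3 && pvContainsAny h (pvOntoPatterns.getD k []) then acc ++ [h] else acc) lo) := by
  induction hs generalizing la lo with
  | nil => rfl
  | cons h t ih =>
    simp only [List.foldl]
    rw [show pvUpdEntry h (PySem.Str.lower h) (k, la, lo)
          = (k, (if la.length < 3 && pvContainsAny h (pvAuthorPatterns.getD k []) then la ++ [h] else la),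
                (if lo.length < 3 && pvContainsAny h (pvOntoPatterns.getD k []) then lo ++ [h] else lo)) from rfl]
    exact ih _ _

-- ===== VERDICT (by name: the statement is the Claim_ definition above) =====
theorem heuristic_candidates_spec : Claim_equal_heuristic_candidates := by
  intro headers _
  unfold Spec_heuristic_candidates heuristic_candidates_alt
  have hk : pvAuthorPatterns.keys
      = ["assay", "cell_type", "development_stage", "disease",
         "self_reported_ethnicity", "sex", "tissue"] := rfl
  simp only [hk]
  rw [show (fun (st : List (String × List String × List String)) (h : String) =>
        let nm := PySem.Str.lower h; st.map (pvUpdEntry h nm))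
      = (fun st h => st.map (pvUpdEntry h (PySem.Str.lower h))) from rfl]
  rw [pv_foldl_map_comm]
  simp only [List.map, pv_entry_fold, pv_bucket_nil]
  rfl
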